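-- pv_equiv track=rewrite | github.com/hadasaelishyov/MCP_Server | src/tools/core/generators/evidence/type_assertions.py | _split_comma_parts
-- ===== SOURCE A (Python) =====
-- def _split_comma_parts(inner: str) -> list[str]:
--     """
--     Split comma-separated parts handling nested brackets.
--
--     Example: "str, dict[str, int], None" -> ["str", "dict[str, int]", "None"]
--     """
--     parts = []
--     current = ""
--     depth = 0
--
--     for char in inner:
--         if char == "[":
--             depth += 1
--             current += char
--         elif char == "]":
--             depth -= 1
--             current += char
--         elif char == "," and depth == 0:
--             if current.strip():
--                 parts.append(current.strip())
--             current = ""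
--         else:
--             current += char
--
--     if current.strip():
--         parts.append(current.strip())
--
--     return parts
-- ===== SOURCE B (Python) =====
-- def _first_top_level_comma(s):
--     depth = 0
--     for i, ch in enumerate(s):
--         if ch == "[":
--             depth += 1
--         elif ch == "]":
--             depth -= 1
--         elif ch == "," and depth == 0:
--             return i
--     return None
--
--
-- def _split_comma_parts(inner):
--     # Pass 1: cut the string into raw segments at top-level commas.
--     segs = []
--     s = inner
--     while True:
--         cut = _first_top_level_comma(s)
--         if cut is None:
--             segs.append(s)
--             break
--         segs.append(s[:cut])
--         s = s[cut + 1:]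
--     # Pass 2: strip each segment, keep the non-empty ones.
--     stripped = [seg.strip() for seg in segs]
--     return [p for p in stripped if p]
-- ===== Notes on version B (the rewrite author's own statement) =====
-- stated objective: alternative
-- what changed: A grows an accumulator string character by character inside one fold; B repeatedly finds the first top-level comma and slices off raw segments, then strips and drops empty segments in a separate pass.
import Mathlib
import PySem

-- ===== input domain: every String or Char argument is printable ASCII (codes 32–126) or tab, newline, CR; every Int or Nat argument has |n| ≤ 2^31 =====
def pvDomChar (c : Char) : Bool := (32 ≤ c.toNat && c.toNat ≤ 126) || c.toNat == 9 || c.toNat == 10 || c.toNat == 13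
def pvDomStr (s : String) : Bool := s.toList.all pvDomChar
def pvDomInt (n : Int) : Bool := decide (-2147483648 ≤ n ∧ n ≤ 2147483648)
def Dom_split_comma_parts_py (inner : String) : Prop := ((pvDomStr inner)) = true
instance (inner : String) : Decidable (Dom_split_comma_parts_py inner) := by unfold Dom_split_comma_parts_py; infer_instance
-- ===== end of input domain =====

-- B replaces A's single fold that grows an accumulator string character by character
-- with two passes: repeated "find first top-level comma, slice it off" to collect raw
-- segments, then a strip-and-drop-empty pass (objective: alternative decomposition).

-- ===== PORT A =====
-- one step of A's for-loop over the characters; state = (parts, current, depth)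
def pvStepA (st : List String × List Char × Int) (c : Char) : List String × List Char × Int :=
  let (parts, current, depth) := st
  if c = '[' then (parts, current ++ [c], depth + 1)
  else if c = ']' then (parts, current ++ [c], depth - 1)
  else if c = ',' ∧ depth = 0 then
    (if PySem.Chars.strip current ≠ [] then parts ++ [String.ofList (PySem.Chars.strip current)]
     else parts, [], depth)
  else (parts, current ++ [c], depth)

-- A's final "if current.strip(): parts.append(current.strip())" block
def pvFinA : List String × List Char × Int → List String
  | (parts, current, _) =>
    if PySem.Chars.strip current ≠ [] then parts ++ [String.ofList (PySem.Chars.strip current)]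
    else parts

def split_comma_parts_py (inner : String) : List String :=
  pvFinA (inner.toList.foldl pvStepA ([], [], 0))

-- ===== PORT B =====
-- _first_top_level_comma: scan with a depth counter, return index of first depth-0 comma
def pvFirstCut : List Char → Int → Nat → Option Nat
  | [], _, _ => none
  | c :: rest, depth, i =>
    if c = '[' then pvFirstCut rest (depth + 1) (i + 1)
    else if c = ']' then pvFirstCut rest (depth - 1) (i + 1)
    else if c = ',' ∧ depth = 0 then some i
    else pvFirstCut rest depth (i + 1)

-- needed by pvSegs for termination (cut index lies inside the list)
theorem pvFirstCut_bounds : ∀ (s : List Char) (d : Int) (i j : Nat),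
    pvFirstCut s d i = some j → i ≤ j ∧ j < i + s.length := by
  intro s
  induction s with
  | nil => intro d i j h; simp [pvFirstCut] at h
  | cons c rest ih =>
    intro d i j h
    simp only [pvFirstCut] at h
    split_ifs at h with h1 h2 h3
    · have := ih (d + 1) (i + 1) j h; simp at *; omega
    · have := ih (d - 1) (i + 1) j h; simp at *; omega
    · simp at h ⊢; omega
    · have := ih d (i + 1) j h; simp at *; omega

-- the while-loop of _split_comma_parts' first pass: cut off segments one by one
def pvSegs (s : List Char) : List (List Char) :=
  match h : pvFirstCut s 0 0 with
  | none => [s]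
  | some cut => s.take cut :: pvSegs (s.drop (cut + 1))
termination_by s.length
decreasing_by
  have := pvFirstCut_bounds s 0 0 cut h
  simp; omega

def split_comma_parts_py_alt (inner : String) : List String :=
  let stripped := (pvSegs inner.toList).map (fun seg => PySem.Chars.strip seg)
  (stripped.filter (fun p => p ≠ [])).map String.ofList

-- ===== PRECONDITION & SPEC =====
def Spec_split_comma_parts_py (inner : String) (out : List String) : Prop := out = split_comma_parts_py_alt inner
instance (inner : String) (out : List String) : Decidable (Spec_split_comma_parts_py inner out) := by unfold Spec_split_comma_parts_py; infer_instance

-- ===== CLAIM (what is proved, stated in full; the proofs are below) =====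
def Claim_equal_split_comma_parts_py : Prop := ∀ (inner : String), Dom_split_comma_parts_py inner → Spec_split_comma_parts_py inner (split_comma_parts_py inner)

-- ===== LEMMAS AND PROOFS =====

-- reference decomposition: the segments A's loop delineates, starting from
-- accumulated prefix `cur` and bracket depth `d`
def pvSegsFrom (cur : List Char) (d : Int) : List Char → List (List Char)
  | [] => [cur]
  | c :: rest =>
    if c = '[' then pvSegsFrom (cur ++ [c]) (d + 1) rest
    else if c = ']' then pvSegsFrom (cur ++ [c]) (d - 1) rest
    else if c = ',' ∧ d = 0 then cur :: pvSegsFrom [] d rest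
    else pvSegsFrom (cur ++ [c]) d rest

def pvFinish (segs : List (List Char)) : List String :=
  ((segs.map (fun seg => PySem.Chars.strip seg)).filter (fun p => p ≠ [])).map String.ofList

theorem pvFinish_cons (x : List Char) (xs : List (List Char)) :
    pvFinish (x :: xs) =
      (if PySem.Chars.strip x ≠ [] then [String.ofList (PySem.Chars.strip x)] else []) ++ pvFinish xs := by
  simp only [pvFinish, List.map_cons, List.filter]
  split_ifs <;> simp_all

theorem pvA_eq_segsFrom : ∀ (l : List Char) (parts : List String) (cur : List Char) (d : Int),
    pvFinA (l.foldl pvStepA (parts, cur, d)) = parts ++ pvFinish (pvSegsFrom cur d l) := by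
  intro l
  induction l with
  | nil =>
    intro parts cur d
    simp only [List.foldl_nil, pvSegsFrom, pvFinish, pvFinA, List.map, List.filter]
    split_ifs <;> simp_all
  | cons c rest ih =>
    intro parts cur d
    simp only [List.foldl_cons, pvStepA, pvSegsFrom]
    split_ifs with h1 h2 h3 h4
    · exact ih parts (cur ++ [c]) (d + 1)
    · exact ih parts (cur ++ [c]) (d - 1)
    · rw [ih _ [] d, pvFinish_cons]
      simp [h4, List.append_assoc]
    · rw [ih _ [] d, pvFinish_cons]
      simp [h4]
    · exact ih parts (cur ++ [c]) d

theorem pvFirstCut_shift : ∀ (s : List Char) (d : Int) (i : Nat),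
    pvFirstCut s d i = (pvFirstCut s d 0).map (· + i) := by
  intro s
  induction s with
  | nil => intro d i; simp [pvFirstCut]
  | cons c rest ih =>
    intro d i
    simp only [pvFirstCut]
    split_ifs with h1 h2 h3
    · rw [ih (d + 1) (i + 1), ih (d + 1) 1]
      cases pvFirstCut rest (d + 1) 0 <;> simp <;> omega
    · rw [ih (d - 1) (i + 1), ih (d - 1) 1]
      cases pvFirstCut rest (d - 1) 0 <;> simp <;> omega
    · simp
    · rw [ih d (i + 1), ih d 1]
      cases pvFirstCut rest d 0 <;> simp <;> omega

theorem pvSegsFrom_cut : ∀ (s : List Char) (cur : List Char) (d : Int),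
    pvSegsFrom cur d s =
      match pvFirstCut s d 0 with
      | none => [cur ++ s]
      | some cut => (cur ++ s.take cut) :: pvSegsFrom [] 0 (s.drop (cut + 1)) := by
  intro s
  induction s with
  | nil => intro cur d; simp [pvSegsFrom, pvFirstCut]
  | cons c rest ih =>
    intro cur d
    simp only [pvSegsFrom, pvFirstCut]
    split_ifs with h1 h2 h3
    · rw [ih (cur ++ [c]) (d + 1), pvFirstCut_shift rest (d + 1) 1]
      cases pvFirstCut rest (d + 1) 0 <;> simp [List.append_assoc]
    · rw [ih (cur ++ [c]) (d - 1), pvFirstCut_shift rest (d - 1) 1]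
      cases pvFirstCut rest (d - 1) 0 <;> simp [List.append_assoc]
    · simp [h3.2]
    · rw [ih (cur ++ [c]) d, pvFirstCut_shift rest d 1]
      cases pvFirstCut rest d 0 <;> simp [List.append_assoc]

theorem pvSegsFrom_eq_pvSegs (s : List Char) : pvSegsFrom [] 0 s = pvSegs s := by
  rw [pvSegs]
  rw [pvSegsFrom_cut]
  cases h : pvFirstCut s 0 0 with
  | none => simp
  | some cut =>
    simp only [List.nil_append]
    congr 1
    have := pvFirstCut_bounds s 0 0 cut h
    exact pvSegsFrom_eq_pvSegs (s.drop (cut + 1))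
termination_by s.length
decreasing_by
  have := pvFirstCut_bounds s 0 0 cut h
  simp; omega

-- ===== VERDICT (by name: the statement is the Claim_ definition above) =====
theorem split_comma_parts_py_spec : Claim_equal_split_comma_parts_py := by
  intro inner _
  unfold Spec_split_comma_parts_py split_comma_parts_py split_comma_parts_py_alt
  rw [pvA_eq_segsFrom inner.toList [] [] 0, pvSegsFrom_eq_pvSegs]
  simp [pvFinish]
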